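-- pv_equiv track=rewrite | github.com/tsilva/parsehealthlog | main.py | _calculate_batch_size
-- ===== SOURCE A (Python) =====
-- def _calculate_batch_size(entries: list[tuple[str, str]], timeline_size: int) -> int:
--     """Calculate how many entries fit in a batch given current timeline size.
--
--     Args:
--         entries: List of (date, content) tuples to potentially include
--         timeline_size: Current character count of timeline
--
--     Returns:
--         Number of entries to include in this batch
--     """
--     CONTEXT_LIMIT = 200_000  # Claude Opus 4.5 context
--     SYSTEM_PROMPT_TOKENS = 3_000
--     MAX_OUTPUT_TOKENS = 32_768  # Match max_tokens in _process_timeline_batch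
--     OUTPUT_TOKENS_PER_ENTRY = 60  # ~1.5 rows per entry, ~40 tokens per row
--     SAFETY_MARGIN = 10_000
--     CHARS_PER_TOKEN = 4
--
--     timeline_tokens = timeline_size // CHARS_PER_TOKEN
--     available_input_tokens = CONTEXT_LIMIT - SYSTEM_PROMPT_TOKENS - timeline_tokens - MAX_OUTPUT_TOKENS - SAFETY_MARGIN
--
--     batch_chars = 0
--     count = 0
--     for _, content in entries:
--         entry_chars = len(content)
--         # Check both input token limit and output token limit
--         estimated_output_tokens = (count + 1) * OUTPUT_TOKENS_PER_ENTRY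
--         if batch_chars + entry_chars > available_input_tokens * CHARS_PER_TOKEN:
--             break
--         if estimated_output_tokens > MAX_OUTPUT_TOKENS - 1000:  # Leave buffer
--             break
--         batch_chars += entry_chars
--         count += 1
--
--     # Ensure at least 1 entry per batch
--     return max(1, count)
-- ===== SOURCE B (Python) =====
-- def _calculate_batch_size(entries: list[tuple[str, str]], timeline_size: int) -> int:
--     CONTEXT_LIMIT = 200_000
--     SYSTEM_PROMPT_TOKENS = 3_000
--     MAX_OUTPUT_TOKENS = 32_768
--     OUTPUT_TOKENS_PER_ENTRY = 60
--     SAFETY_MARGIN = 10_000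
--     CHARS_PER_TOKEN = 4
--
--     available_input_tokens = (CONTEXT_LIMIT - SYSTEM_PROMPT_TOKENS
--                               - timeline_size // CHARS_PER_TOKEN
--                               - MAX_OUTPUT_TOKENS - SAFETY_MARGIN)
--     char_limit = available_input_tokens * CHARS_PER_TOKEN
--     # largest count whose estimated output (count * 60) stays within the buffer
--     output_cap = (MAX_OUTPUT_TOKENS - 1000) // OUTPUT_TOKENS_PER_ENTRY
--
--     # prefix sums of entry lengths
--     prefixes = []
--     total = 0
--     for _, content in entries:
--         total += len(content)
--         prefixes.append(total)
--
--     # binary search: number of prefixes <= char_limit (prefixes are nondecreasing)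
--     lo, hi = 0, len(prefixes)
--     while lo < hi:
--         mid = (lo + hi) // 2
--         if prefixes[mid] <= char_limit:
--             lo = mid + 1
--         else:
--             hi = mid
--     return max(1, min(lo, output_cap))
-- ===== Notes on version B (the rewrite author's own statement) =====
-- stated objective: alternative
-- what changed: Replaces A's single interleaved scan (running sum, two break conditions, counter) by a prefix-sum table, a hand-written binary search for the number of prefixes within the character limit, and a closed-form output-token cap (31768 // 60 = 529) combined with min/max.
import Mathlib
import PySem

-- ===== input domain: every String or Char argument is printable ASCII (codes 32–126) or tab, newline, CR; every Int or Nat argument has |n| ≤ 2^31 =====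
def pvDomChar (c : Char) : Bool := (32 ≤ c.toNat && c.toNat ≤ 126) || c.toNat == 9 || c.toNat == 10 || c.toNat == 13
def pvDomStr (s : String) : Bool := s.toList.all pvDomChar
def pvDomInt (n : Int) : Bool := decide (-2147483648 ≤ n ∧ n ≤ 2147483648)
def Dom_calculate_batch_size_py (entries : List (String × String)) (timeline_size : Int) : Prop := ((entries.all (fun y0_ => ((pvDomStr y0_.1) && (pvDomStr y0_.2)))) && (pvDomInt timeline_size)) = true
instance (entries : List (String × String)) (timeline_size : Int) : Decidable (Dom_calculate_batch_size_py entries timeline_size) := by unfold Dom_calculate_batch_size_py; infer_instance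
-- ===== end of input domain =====

-- B replaces A's interleaved break-loop by a prefix-sum table + binary search + closed-form cap (alternative decomposition, same cost).

-- ===== PORT A =====
-- A's for-loop with two break conditions, state (batch_chars, count)
def pvLoopA : List (String × String) → Int → Int → Int → Int
  | [], _, _, count => count
  | (_, content) :: rest, avail, batch_chars, count =>
    let entry_chars := PySem.Str.len content
    let estimated_output_tokens := (count + 1) * 60
    if batch_chars + entry_chars > avail * 4 then count
    else if estimated_output_tokens > 32768 - 1000 then count
    else pvLoopA rest avail (batch_chars + entry_chars) (count + 1)

def calculate_batch_size_py (entries : List (String × String)) (timeline_size : Int) : Int :=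
  let timeline_tokens := PySem.Int.floordiv timeline_size 4
  let available_input_tokens := 200000 - 3000 - timeline_tokens - 32768 - 10000
  max 1 (pvLoopA entries available_input_tokens 0 0)

-- ===== PORT B =====
-- Source B's prefix-sum loop: running total, one prefix appended per entry
def pvPrefixes : List (String × String) → Int → List Int
  | [], _ => []
  | (_, content) :: rest, total =>
    let t := total + PySem.Str.len content
    t :: pvPrefixes rest t

-- Source B's while-loop binary search; prefixes[mid] is always in range (lo < hi ≤ length), ported as getD
def pvBisect (l : List Int) (x : Int) (lo hi : Nat) : Nat :=
  if lo < hi then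
    let mid := (lo + hi) / 2
    if l.getD mid 0 ≤ x then pvBisect l x (mid + 1) hi
    else pvBisect l x lo mid
  else lo
termination_by hi - lo
decreasing_by all_goals omega

def calculate_batch_size_py_alt (entries : List (String × String)) (timeline_size : Int) : Int :=
  let available_input_tokens := 200000 - 3000 - PySem.Int.floordiv timeline_size 4 - 32768 - 10000
  let char_limit := available_input_tokens * 4
  let output_cap := PySem.Int.floordiv (32768 - 1000) 60
  let prefixes := pvPrefixes entries 0
  let lo := pvBisect prefixes char_limit 0 prefixes.length
  max 1 (min (lo : Int) output_cap)

-- ===== PRECONDITION & SPEC =====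
def Spec_calculate_batch_size_py (entries : List (String × String)) (timeline_size : Int) (out : Int) : Prop := out = calculate_batch_size_py_alt entries timeline_size
instance (entries : List (String × String)) (timeline_size : Int) (out : Int) : Decidable (Spec_calculate_batch_size_py entries timeline_size out) := by unfold Spec_calculate_batch_size_py; infer_instance

-- ===== CLAIM (what is proved, stated in full; the proofs are below) =====
def Claim_equal_calculate_batch_size_py : Prop := ∀ (entries : List (String × String)) (timeline_size : Int), Dom_calculate_batch_size_py entries timeline_size → Spec_calculate_batch_size_py entries timeline_size (calculate_batch_size_py entries timeline_size)

-- ===== LEMMAS AND PROOFS =====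

-- count of leading prefixes ≤ x (reference characterisation shared by both proofs)
def pvCnt : List Int → Int → Nat
  | [], _ => 0
  | p :: r, x => if p ≤ x then 1 + pvCnt r x else 0

theorem pvCnt_le_length (l : List Int) (x : Int) : pvCnt l x ≤ l.length := by
  induction l with
  | nil => simp [pvCnt]
  | cons p r ih =>
    by_cases h : p ≤ x
    · simp [pvCnt, h]; omega
    · simp [pvCnt, h]

theorem pvCnt_left (l : List Int) (x : Int) : ∀ i < pvCnt l x, l.getD i 0 ≤ x := by
  induction l with
  | nil => simp [pvCnt]
  | cons p r ih =>
    intro i hi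
    by_cases h : p ≤ x
    · cases i with
      | zero => simpa using h
      | succ j =>
        simp only [pvCnt, h, if_pos] at hi
        simpa using ih j (by omega)
    · simp [pvCnt, h] at hi

theorem pvCnt_right (l : List Int) (x : Int) (h : pvCnt l x < l.length) :
    ¬ l.getD (pvCnt l x) 0 ≤ x := by
  induction l with
  | nil => simp at h
  | cons p r ih =>
    by_cases hp : p ≤ x
    · simp only [pvCnt, hp, if_pos, List.length_cons] at h ⊢
      rw [Nat.add_comm 1 (pvCnt r x)]
      have := ih (by omega)
      simpa using this
    · simp [pvCnt, hp]

theorem pairwise_getD {l : List Int} (hp : l.Pairwise (· ≤ ·)) {i j : Nat}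
    (hij : i ≤ j) (hj : j < l.length) : l.getD i 0 ≤ l.getD j 0 := by
  rcases Nat.eq_or_lt_of_le hij with rfl | hlt
  · exact le_refl _
  · rw [List.getD_eq_getElem l 0 (by omega), List.getD_eq_getElem l 0 hj]
    exact (List.pairwise_iff_getElem.mp hp) i j (by omega) hj hlt

theorem pvBisect_spec (l : List Int) (x : Int) (hp : l.Pairwise (· ≤ ·)) :
    ∀ n lo hi, hi - lo = n → hi ≤ l.length → lo ≤ hi →
    (∀ i < lo, l.getD i 0 ≤ x) →
    (∀ i, hi ≤ i → i < l.length → ¬ l.getD i 0 ≤ x) →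
    pvBisect l x lo hi ≤ hi ∧
    (∀ i < pvBisect l x lo hi, l.getD i 0 ≤ x) ∧
    (∀ i, pvBisect l x lo hi ≤ i → i < l.length → ¬ l.getD i 0 ≤ x) := by
  intro n
  induction n using Nat.strong_induction_on with
  | _ n ihn =>
    intro lo hi hn hhi hlohi hleft hright
    rw [pvBisect]
    by_cases hlh : lo < hi
    · simp only [hlh, if_pos]
      by_cases hmid : l.getD ((lo + hi) / 2) 0 ≤ x
      · simp only [hmid, if_pos]
        have h := ihn (hi - ((lo + hi) / 2 + 1)) (by omega) ((lo + hi) / 2 + 1) hi rfl hhi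
          (by omega)
          (fun i hi' => by
            by_cases hc : i < lo
            · exact hleft i hc
            · exact le_trans (pairwise_getD hp (by omega) (by omega)) hmid)
          hright
        exact ⟨h.1, h.2.1, h.2.2⟩
      · simp only [hmid, if_neg, not_false_iff]
        have h := ihn ((lo + hi) / 2 - lo) (by omega) lo ((lo + hi) / 2) rfl (by omega)
          (by omega) hleft
          (fun i hmi hil hc => hmid (le_trans (pairwise_getD hp hmi hil) hc))
        exact ⟨by omega, h.2.1, h.2.2⟩
    · simp only [hlh, if_neg, not_false_iff]
      exact ⟨by omega, hleft, fun i hi1 hi2 => hright i (by omega) hi2⟩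

theorem pvBisect_eq_pvCnt (l : List Int) (x : Int) (hp : l.Pairwise (· ≤ ·)) :
    pvBisect l x 0 l.length = pvCnt l x := by
  obtain ⟨hle, h1, h2⟩ := pvBisect_spec l x hp l.length 0 l.length rfl (le_refl _)
    (Nat.zero_le _) (by omega) (by omega)
  set r := pvBisect l x 0 l.length with hr
  have hcl := pvCnt_le_length l x
  rcases Nat.lt_trichotomy r (pvCnt l x) with h | h | h
  · exact absurd (pvCnt_left l x r h) (h2 r (le_refl _) (by omega))
  · exact h
  · exact absurd (h1 (pvCnt l x) h) (pvCnt_right l x (by omega))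

theorem pvStrLen_nonneg (s : String) : 0 ≤ PySem.Str.len s := by
  simp [PySem.Str.len_eq]

theorem pvPrefixes_ge (l : List (String × String)) (s : Int) :
    ∀ p ∈ pvPrefixes l s, s ≤ p := by
  induction l generalizing s with
  | nil => simp [pvPrefixes]
  | cons e r ih =>
    intro p hp
    obtain ⟨d, c⟩ := e
    simp only [pvPrefixes, List.mem_cons] at hp
    rcases hp with rfl | hp
    · have := pvStrLen_nonneg c; omega
    · have := ih (s + PySem.Str.len c) p hp
      have := pvStrLen_nonneg c; omega

theorem pvPrefixes_pairwise (l : List (String × String)) (s : Int) :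
    (pvPrefixes l s).Pairwise (· ≤ ·) := by
  induction l generalizing s with
  | nil => simp [pvPrefixes]
  | cons e r ih =>
    obtain ⟨d, c⟩ := e
    simp only [pvPrefixes, List.pairwise_cons]
    exact ⟨fun p hp => pvPrefixes_ge r _ p hp, ih _⟩

theorem pvLoopA_eq (l : List (String × String)) (avail : Int) :
    ∀ bc count : Int, 0 ≤ count → count ≤ 529 →
    pvLoopA l avail bc count = min (count + (pvCnt (pvPrefixes l bc) (avail * 4) : Int)) 529 := by
  induction l with
  | nil => intro bc count h0 h529; simp [pvLoopA, pvPrefixes, pvCnt]; omega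
  | cons e r ih =>
    intro bc count h0 h529
    obtain ⟨d, c⟩ := e
    simp only [pvLoopA, pvPrefixes, pvCnt]
    by_cases h1 : bc + PySem.Str.len c > avail * 4
    · simp only [h1, if_pos]
      rw [if_neg (by omega)]
      push_cast
      omega
    · rw [if_neg h1]
      by_cases h2 : (count + 1) * 60 > 32768 - 1000
      · rw [if_pos h2, if_pos (by omega)]
        push_cast
        omega
      · rw [if_neg h2, if_pos (by omega)]
        rw [ih (bc + PySem.Str.len c) (count + 1) (by omega) (by omega)]
        push_cast
        omega

-- ===== VERDICT (by name: the statement is the Claim_ definition above) =====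
theorem calculate_batch_size_py_spec : Claim_equal_calculate_batch_size_py := by
  intro entries timeline_size _
  show _ = calculate_batch_size_py_alt entries timeline_size
  unfold calculate_batch_size_py calculate_batch_size_py_alt
  dsimp only
  set avail := 200000 - 3000 - PySem.Int.floordiv timeline_size 4 - 32768 - 10000 with ha
  rw [pvLoopA_eq entries avail 0 0 (le_refl _) (by omega)]
  rw [pvBisect_eq_pvCnt _ _ (pvPrefixes_pairwise entries 0)]
  have hcap : PySem.Int.floordiv (32768 - 1000) 60 = 529 := by decide
  rw [hcap]
  omega
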